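-- pv_equiv track=rewrite | github.com/yharby/geoparquet-io | geoparquet_io/core/common.py | is_remote_url
-- ===== SOURCE A (Python) =====
-- def is_remote_url(path):
--     """
--     Check if path is a remote URL that DuckDB can read.
--
--     Supports:
--     - HTTP/HTTPS: http://, https://
--     - AWS S3: s3://, s3a://
--     - Azure: az://, azure://, abfs://, abfss://
--     - Google Cloud Storage: gs://, gcs://
--
--     Args:
--         path: File path or URL to check
--
--     Returns:
--         bool: True if path is a remote URL, False otherwise
--     """
--     if path is None:
--         return False
--     remote_schemes = [
--         "http://",
--         "https://",
--         "s3://",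
--         "s3a://",
--         "gs://",
--         "gcs://",
--         "az://",
--         "azure://",
--         "abfs://",
--         "abfss://",
--     ]
--     return any(path.startswith(scheme) for scheme in remote_schemes)
-- ===== SOURCE B (Python) =====
-- def is_remote_url(path):
--     if path is None:
--         return False
--     schemes = {'http', 'https', 's3', 's3a', 'gs', 'gcs',
--                'az', 'azure', 'abfs', 'abfss'}
--     for i, c in enumerate(path):
--         if c == ':':
--             return path[i + 1:i + 3] == '//' and path[:i] in schemes
--     return False
-- ===== Notes on version B (the rewrite author's own statement) =====
-- stated objective: alternative
-- what changed: Instead of testing ten startswith prefixes, B scans the string once left to right for the first ':', then checks that '//' follows it and that the prefix before it is one of the known schemes.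
import Mathlib
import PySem

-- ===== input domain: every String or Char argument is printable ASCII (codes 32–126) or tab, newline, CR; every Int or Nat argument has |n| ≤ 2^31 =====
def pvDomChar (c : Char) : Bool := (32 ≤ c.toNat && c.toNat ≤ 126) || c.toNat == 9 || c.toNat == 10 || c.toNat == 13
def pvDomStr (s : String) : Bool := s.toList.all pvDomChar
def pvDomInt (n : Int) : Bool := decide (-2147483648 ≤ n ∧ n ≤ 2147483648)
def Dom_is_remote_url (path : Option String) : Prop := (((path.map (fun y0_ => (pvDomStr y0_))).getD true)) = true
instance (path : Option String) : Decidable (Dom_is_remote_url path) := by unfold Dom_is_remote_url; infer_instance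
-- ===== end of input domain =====

-- B replaces A's ten startswith prefix tests by a single left-to-right scan that
-- stops at the first ':' and then checks '//' follows and the prefix before it is a
-- known scheme (objective: alternative).

-- ===== PORT A =====
def is_remote_url (path : Option String) : Bool :=
  match path with
  | none => false
  | some p =>
      let remote_schemes : List String :=
        ["http://", "https://", "s3://", "s3a://", "gs://", "gcs://",
         "az://", "azure://", "abfs://", "abfss://"]
      remote_schemes.any (fun scheme => PySem.Str.startswith p scheme)

-- ===== PORT B =====
-- the scheme set of Source B
def pvSchemes : List String :=
  ["http", "https", "s3", "s3a", "gs", "gcs", "az", "azure", "abfs", "abfss"]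

-- the for-loop of Source B: `scheme` is the consumed prefix path[:i], `rest` the unread tail path[i:]
def pvScanLoop (scheme : List Char) (rest : List Char) : Bool :=
  match rest with
  | [] => false
  | c :: rest' =>
      if c = ':' then
        decide (rest'.take 2 = ['/', '/']) && pvSchemes.contains (String.ofList scheme)
      else pvScanLoop (scheme ++ [c]) rest'

def is_remote_url_alt (path : Option String) : Bool :=
  match path with
  | none => false
  | some p => pvScanLoop [] p.toList

-- ===== PRECONDITION & SPEC =====
def Spec_is_remote_url (path : Option String) (out : Bool) : Prop := out = is_remote_url_alt path
instance (path : Option String) (out : Bool) : Decidable (Spec_is_remote_url path out) := by unfold Spec_is_remote_url; infer_instance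

-- ===== CLAIM (what is proved, stated in full; the proofs are below) =====
def Claim_equal_is_remote_url : Prop := ∀ (path : Option String), Dom_is_remote_url path → Spec_is_remote_url path (is_remote_url path)

-- ===== LEMMAS AND PROOFS =====

-- `rest[:2] == '//'` means rest starts with two slashes
theorem pv_take2_iff (cs : List Char) :
    cs.take 2 = ['/', '/'] ↔ ∃ t, cs = '/' :: '/' :: t := by
  match cs with
  | [] => simp
  | [a] => simp
  | a :: b :: t => simp [List.take]

-- the scan returns true iff the input splits as pre ++ "://" ++ t with ':' not in pre
-- and (accumulator ++ pre) a known scheme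
theorem pvScanLoop_iff (cs : List Char) : ∀ acc : List Char,
    pvScanLoop acc cs = true ↔
      ∃ pre t, cs = pre ++ ':' :: '/' :: '/' :: t ∧ ':' ∉ pre ∧
        pvSchemes.contains (String.ofList (acc ++ pre)) = true := by
  induction cs with
  | nil =>
      intro acc
      simp [pvScanLoop]
  | cons c cs' ih =>
      intro acc
      by_cases hc : c = ':'
      · subst hc
        rw [show pvScanLoop acc (':' :: cs')
              = (decide (cs'.take 2 = ['/', '/']) && pvSchemes.contains (String.ofList acc))
            from rfl]
        rw [Bool.and_eq_true, decide_eq_true_eq, pv_take2_iff]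
        constructor
        · rintro ⟨⟨t, rfl⟩, hmem⟩
          exact ⟨[], t, rfl, by simp, by simpa using hmem⟩
        · rintro ⟨pre, t, heq, hno, hmem⟩
          match pre, heq with
          | [], heq =>
              injection heq with h1 h2
              exact ⟨⟨t, h2⟩, by simpa using hmem⟩
          | p :: pre', heq =>
              injection heq with h1 h2
              exact absurd (h1 ▸ List.mem_cons_self) hno
      · rw [show pvScanLoop acc (c :: cs') = pvScanLoop (acc ++ [c]) cs' by
            simp [pvScanLoop, hc], ih (acc ++ [c])]
        constructor
        · rintro ⟨pre, t, rfl, hno, hmem⟩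
          refine ⟨c :: pre, t, rfl, ?_, by simpa using hmem⟩
          simp only [List.mem_cons, not_or]
          exact ⟨fun h => hc h.symm, hno⟩
        · rintro ⟨pre, t, heq, hno, hmem⟩
          match pre, heq with
          | [], heq =>
              injection heq with h1 h2
              exact absurd h1 hc
          | p :: pre', heq =>
              injection heq with h1 h2
              subst h1
              exact ⟨pre', t, h2, fun h => hno (List.mem_cons_of_mem _ h),
                by simpa using hmem⟩

-- one startswith test of A in terms of the split B's scan detects
theorem pv_startswith_iff (p name lit : String)
    (hlit : lit.toList = name.toList ++ [':', '/', '/']) :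
    (PySem.Str.startswith p lit = true ↔
      ∃ t, p.toList = name.toList ++ ':' :: '/' :: '/' :: t) := by
  have h : PySem.Str.startswith p lit = PySem.Chars.startswith p.toList lit.toList := by
    simp
  rw [h, PySem.Chars.startswith_iff, hlit]
  constructor
  · rintro ⟨t, ht⟩; exact ⟨t, by simpa using ht.symm⟩
  · rintro ⟨t, ht⟩; exact ⟨t, by simp [ht]⟩

-- ===== VERDICT (by name: the statement is the Claim_ definition above) =====
theorem is_remote_url_spec : Claim_equal_is_remote_url := by
  intro path _
  unfold Spec_is_remote_url
  match path with
  | none => rfl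
  | some p =>
    simp only [is_remote_url, is_remote_url_alt]
    rw [Bool.eq_iff_iff, pvScanLoop_iff p.toList [], List.any_eq_true]
    constructor
    · rintro ⟨lit, hmem, hsw⟩
      simp only [List.mem_cons, List.not_mem_nil, or_false] at hmem
      rcases hmem with rfl | rfl | rfl | rfl | rfl | rfl | rfl | rfl | rfl | rfl
      · obtain ⟨t, ht⟩ := (pv_startswith_iff p "http" "http://" (by decide)).mp hsw
        exact ⟨"http".toList, t, ht, by decide, by decide⟩
      · obtain ⟨t, ht⟩ := (pv_startswith_iff p "https" "https://" (by decide)).mp hsw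
        exact ⟨"https".toList, t, ht, by decide, by decide⟩
      · obtain ⟨t, ht⟩ := (pv_startswith_iff p "s3" "s3://" (by decide)).mp hsw
        exact ⟨"s3".toList, t, ht, by decide, by decide⟩
      · obtain ⟨t, ht⟩ := (pv_startswith_iff p "s3a" "s3a://" (by decide)).mp hsw
        exact ⟨"s3a".toList, t, ht, by decide, by decide⟩
      · obtain ⟨t, ht⟩ := (pv_startswith_iff p "gs" "gs://" (by decide)).mp hsw
        exact ⟨"gs".toList, t, ht, by decide, by decide⟩
      · obtain ⟨t, ht⟩ := (pv_startswith_iff p "gcs" "gcs://" (by decide)).mp hsw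
        exact ⟨"gcs".toList, t, ht, by decide, by decide⟩
      · obtain ⟨t, ht⟩ := (pv_startswith_iff p "az" "az://" (by decide)).mp hsw
        exact ⟨"az".toList, t, ht, by decide, by decide⟩
      · obtain ⟨t, ht⟩ := (pv_startswith_iff p "azure" "azure://" (by decide)).mp hsw
        exact ⟨"azure".toList, t, ht, by decide, by decide⟩
      · obtain ⟨t, ht⟩ := (pv_startswith_iff p "abfs" "abfs://" (by decide)).mp hsw
        exact ⟨"abfs".toList, t, ht, by decide, by decide⟩
      · obtain ⟨t, ht⟩ := (pv_startswith_iff p "abfss" "abfss://" (by decide)).mp hsw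
        exact ⟨"abfss".toList, t, ht, by decide, by decide⟩
    · rintro ⟨pre, t, heq, hno, hmem⟩
      simp only [List.nil_append] at hmem
      have hmk : String.ofList pre ∈ pvSchemes := by
        simpa [List.contains_eq_mem] using hmem
      simp only [pvSchemes, List.mem_cons, List.not_mem_nil, or_false] at hmk
      rcases hmk with h | h | h | h | h | h | h | h | h | h
      · have hpre : pre = "http".toList := by
          have h2 := congrArg String.toList h
          simpa using h2
        exact ⟨"http://", by simp, (pv_startswith_iff p "http" "http://" (by decide)).mpr
          ⟨t, hpre ▸ heq⟩⟩
      · have hpre : pre = "https".toList := by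
          have h2 := congrArg String.toList h
          simpa using h2
        exact ⟨"https://", by simp, (pv_startswith_iff p "https" "https://" (by decide)).mpr
          ⟨t, hpre ▸ heq⟩⟩
      · have hpre : pre = "s3".toList := by
          have h2 := congrArg String.toList h
          simpa using h2
        exact ⟨"s3://", by simp, (pv_startswith_iff p "s3" "s3://" (by decide)).mpr
          ⟨t, hpre ▸ heq⟩⟩
      · have hpre : pre = "s3a".toList := by
          have h2 := congrArg String.toList h
          simpa using h2
        exact ⟨"s3a://", by simp, (pv_startswith_iff p "s3a" "s3a://" (by decide)).mpr
          ⟨t, hpre ▸ heq⟩⟩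
      · have hpre : pre = "gs".toList := by
          have h2 := congrArg String.toList h
          simpa using h2
        exact ⟨"gs://", by simp, (pv_startswith_iff p "gs" "gs://" (by decide)).mpr
          ⟨t, hpre ▸ heq⟩⟩
      · have hpre : pre = "gcs".toList := by
          have h2 := congrArg String.toList h
          simpa using h2
        exact ⟨"gcs://", by simp, (pv_startswith_iff p "gcs" "gcs://" (by decide)).mpr
          ⟨t, hpre ▸ heq⟩⟩
      · have hpre : pre = "az".toList := by
          have h2 := congrArg String.toList h
          simpa using h2
        exact ⟨"az://", by simp, (pv_startswith_iff p "az" "az://" (by decide)).mpr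
          ⟨t, hpre ▸ heq⟩⟩
      · have hpre : pre = "azure".toList := by
          have h2 := congrArg String.toList h
          simpa using h2
        exact ⟨"azure://", by simp, (pv_startswith_iff p "azure" "azure://" (by decide)).mpr
          ⟨t, hpre ▸ heq⟩⟩
      · have hpre : pre = "abfs".toList := by
          have h2 := congrArg String.toList h
          simpa using h2
        exact ⟨"abfs://", by simp, (pv_startswith_iff p "abfs" "abfs://" (by decide)).mpr
          ⟨t, hpre ▸ heq⟩⟩
      · have hpre : pre = "abfss".toList := by
          have h2 := congrArg String.toList h
          simpa using h2
        exact ⟨"abfss://", by simp, (pv_startswith_iff p "abfss" "abfss://" (by decide)).mpr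
          ⟨t, hpre ▸ heq⟩⟩
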